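-- pv_equiv track=rewrite | github.com/SriVishnu19/MSGSP | project/extra.py | support_count
-- ===== SOURCE A (Python) =====
-- def is_subset(sub, seq):
--     if len(list(set(sub))) != len(sub):
--           return False
--
--     for i in sub:
--         if i not in seq:
--             return False
--
--     return True
--
-- def is_subsequence(sub, seq):
--     explored = []
--     next = 0
--     for i in sub:
--         found = False
--         j = next
--         while j < len(seq):
--             if j in explored:
--                 pass
--             else:
--                 if is_subset(i, seq[j]):
--                     explored.append(j)
--                     found = True
--                     next = j+1
--                     break
--             j =j+1
--         if not found:
--             return False
--
--     return True
--
-- def support_count(Ck, data):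
--     sup = [0] * len(Ck)
--
--     for s in range(len(Ck)):
--         count = 0
--         for d in data:
--             if is_subsequence(Ck[s], d):
--                 count += 1
--         sup[s] = count
--
--     return sup
-- ===== SOURCE B (Python) =====
-- def _matches(itemset, trans):
--     s = set(itemset)
--     return len(s) == len(itemset) and s.issubset(trans)
--
-- def _occurs(cand, seq):
--     ci = 0
--     for trans in seq:
--         if ci < len(cand) and _matches(cand[ci], trans):
--             ci += 1
--     return ci == len(cand)
--
-- def support_count(Ck, data):
--     return [sum(1 for d in data if _occurs(c, d)) for c in Ck]
-- ===== Notes on version B (the rewrite author's own statement) =====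
-- stated objective: simpler
-- what changed: is_subsequence's outer-loop-with-inner-while (plus the redundant explored list and next pointer) is replaced by a single sweep over the data sequence that advances one candidate index, the subset test by a set-comparison (no duplicates and set(itemset) <= trans), and the counting loop by a filter/sum comprehension.
import Mathlib
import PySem

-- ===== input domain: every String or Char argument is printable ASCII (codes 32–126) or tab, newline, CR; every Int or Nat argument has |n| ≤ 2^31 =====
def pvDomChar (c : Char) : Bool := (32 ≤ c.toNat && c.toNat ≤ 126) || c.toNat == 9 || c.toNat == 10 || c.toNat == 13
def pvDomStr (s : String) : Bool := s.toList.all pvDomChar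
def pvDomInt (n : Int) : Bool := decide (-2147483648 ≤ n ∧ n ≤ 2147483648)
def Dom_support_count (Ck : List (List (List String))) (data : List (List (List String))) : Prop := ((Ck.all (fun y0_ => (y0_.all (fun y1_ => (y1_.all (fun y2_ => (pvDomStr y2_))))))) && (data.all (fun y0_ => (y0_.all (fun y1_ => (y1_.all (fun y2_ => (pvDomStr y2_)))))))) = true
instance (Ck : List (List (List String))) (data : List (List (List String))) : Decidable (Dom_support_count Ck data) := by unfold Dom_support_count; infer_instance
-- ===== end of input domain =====

-- B replaces A's nested outer-loop/inner-while subsequence matcher (with its redundant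
-- `explored` list and `next` pointer) by a single sweep over the data sequence advancing
-- one candidate index, and counts matches with a comprehension-style filter (objective: simpler).

-- ===== PORT A =====
-- is_subset(sub, seq): duplicate check via set, then membership loop
def is_subset (sub : List String) (seq : List String) : Bool :=
  if (PySem.Set.ofList sub).length ≠ sub.length then false
  else sub.all (fun i => seq.contains i)

-- the inner `while j < len(seq)` loop of is_subsequence; returns the j where it `break`s
def scanFrom (seq : List (List String)) (i : List String) (explored : List Nat) (j : Nat) :
    Option Nat :=
  if h : j < seq.length then
    if explored.contains j then scanFrom seq i explored (j + 1)
    else if is_subset i (seq.getD j []) then some j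
    else scanFrom seq i explored (j + 1)
  else none
termination_by seq.length - j

-- the `for i in sub` loop of is_subsequence, carrying (explored, next)
def subseqGo (seq : List (List String)) :
    List (List String) → List Nat → Nat → Bool
  | [], _, _ => true
  | i :: rest, explored, next =>
    match scanFrom seq i explored next with
    | some j => subseqGo seq rest (explored ++ [j]) (j + 1)
    | none => false

def is_subsequence (sub : List (List String)) (seq : List (List String)) : Bool :=
  subseqGo seq sub [] 0

-- sup = [0]*len(Ck); for s in range(len(Ck)): count the matching d; sup[s] = count
def support_count (Ck : List (List (List String))) (data : List (List (List String))) :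
    List Int :=
  (PySem.List.pyRange 0 (Ck.length : Int)).foldl
    (fun sup s =>
      PySem.List.pySetD sup s
        (data.foldl (fun c d => if is_subsequence (Ck.getD s.toNat []) d then c + 1 else c) 0))
    (List.replicate Ck.length 0)

-- ===== PORT B =====
-- _matches(itemset, trans): set(itemset) has no duplicates and is a subset of trans
def sc_matches (itemset : List String) (trans : List String) : Bool :=
  let s := PySem.Set.ofList itemset
  s.length == itemset.length && PySem.Set.issubset s trans

-- _occurs(cand, seq): one sweep over seq advancing a candidate index ci
def sc_occurs (cand : List (List String)) (seq : List (List String)) : Bool :=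
  (seq.foldl
    (fun ci trans =>
      if ci < cand.length && sc_matches (cand.getD ci []) trans then ci + 1 else ci)
    0) == cand.length

def support_count_alt (Ck : List (List (List String))) (data : List (List (List String))) :
    List Int :=
  Ck.map (fun c => ((data.filter (fun d => sc_occurs c d)).length : Int))

-- ===== PRECONDITION & SPEC =====
def Spec_support_count (Ck : List (List (List String))) (data : List (List (List String))) (out : List Int) : Prop := out = support_count_alt Ck data
instance (Ck : List (List (List String))) (data : List (List (List String))) (out : List Int) : Decidable (Spec_support_count Ck data out) := by unfold Spec_support_count; infer_instance

-- ===== CLAIM (what is proved, stated in full; the proofs are below) =====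
def Claim_equal_support_count : Prop := ∀ (Ck : List (List (List String))) (data : List (List (List String))), Dom_support_count Ck data → Spec_support_count Ck data (support_count Ck data)

-- ===== LEMMAS AND PROOFS =====

-- B's per-transaction test agrees with A's is_subset
theorem sc_matches_eq (i t : List String) : sc_matches i t = is_subset i t := by
  unfold sc_matches is_subset PySem.Set.issubset
  by_cases h : (PySem.Set.ofList i).length = i.length
  · simp only [h, ne_eq, not_true_eq_false, if_false, beq_self_eq_true, Bool.true_and]
    apply Bool.coe_iff_coe.mp
    simp [List.all_eq_true, PySem.Set.mem_ofList]
  · simp [h]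

-- the common greedy matcher both programs implement
def greedy : List (List String) → List (List String) → Bool
  | [], _ => true
  | _ :: _, [] => false
  | c :: cs, t :: ts => if is_subset c t then greedy cs ts else greedy (c :: cs) ts

-- the inner while loop with no explored index ≥ j simply finds the first match from j
def firstFrom (seq : List (List String)) (i : List String) (j : Nat) : Option Nat :=
  if h : j < seq.length then
    if is_subset i (seq.getD j []) then some j else firstFrom seq i (j + 1)
  else none
termination_by seq.length - j

theorem scanFrom_eq_firstFrom (seq : List (List String)) (i : List String)
    (explored : List Nat) (j : Nat) (hinv : ∀ e ∈ explored, e < j) :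
    scanFrom seq i explored j = firstFrom seq i j := by
  unfold scanFrom firstFrom
  by_cases h : j < seq.length
  · have hnot : explored.contains j = false := by
      simp only [List.contains_eq_mem, decide_eq_false_iff_not]
      intro hmem; exact absurd (hinv j hmem) (by omega)
    rw [dif_pos h, dif_pos h, hnot]
    simp only [Bool.false_eq_true, if_false]
    by_cases hm : is_subset i (seq.getD j []) = true
    · rw [if_pos hm, if_pos hm]
    · rw [if_neg hm, if_neg hm]
      exact scanFrom_eq_firstFrom seq i explored (j + 1) (fun e he => by
        have := hinv e he; omega)
  · rw [dif_neg h, dif_neg h]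
termination_by seq.length - j

theorem firstFrom_ge (seq : List (List String)) (i : List String) (j k : Nat)
    (h : firstFrom seq i j = some k) : j ≤ k := by
  unfold firstFrom at h
  by_cases hj : j < seq.length
  · rw [dif_pos hj] at h
    by_cases hm : is_subset i (seq.getD j []) = true
    · rw [if_pos hm] at h
      simp only [Option.some.injEq] at h; omega
    · rw [if_neg hm] at h
      have := firstFrom_ge seq i (j + 1) k h; omega
  · rw [dif_neg hj] at h; exact absurd h (by simp)
termination_by seq.length - j

theorem greedy_drop_cons (seq : List (List String)) (n : Nat) (i : List String)
    (rest : List (List String)) :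
    greedy (i :: rest) (seq.drop n) =
      match firstFrom seq i n with
      | some j => greedy rest (seq.drop (j + 1))
      | none => false := by
  induction hk : seq.length - n using Nat.strong_induction_on generalizing n with
  | _ k ih =>
    by_cases hn : n < seq.length
    · rw [List.drop_eq_getElem_cons hn, greedy]
      unfold firstFrom
      have hget : seq.getD n [] = seq[n] := List.getD_eq_getElem seq [] hn
      rw [dif_pos hn, hget]
      by_cases hm : is_subset i seq[n] = true
      · rw [if_pos hm, if_pos hm]
      · rw [if_neg hm, if_neg hm]
        exact ih (seq.length - (n + 1)) (by omega) (n + 1) rfl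
    · have hdrop : seq.drop n = [] := List.drop_eq_nil_of_le (by omega)
      rw [hdrop, greedy]
      unfold firstFrom
      rw [dif_neg hn]

theorem subseqGo_eq_greedy (seq : List (List String)) (sub : List (List String))
    (explored : List Nat) (n : Nat) (hinv : ∀ e ∈ explored, e < n) :
    subseqGo seq sub explored n = greedy sub (seq.drop n) := by
  induction sub generalizing explored n with
  | nil => simp [subseqGo, greedy]
  | cons i rest ih =>
    rw [subseqGo, scanFrom_eq_firstFrom seq i explored n hinv, greedy_drop_cons seq n]
    cases hf : firstFrom seq i n with
    | none => rfl
    | some j =>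
      have hj : n ≤ j := firstFrom_ge seq i n j hf
      exact ih (explored ++ [j]) (j + 1) (fun e he => by
        rcases List.mem_append.mp he with h1 | h2
        · have := hinv e h1; omega
        · simp at h2; omega)

-- B's fold with candidate pointer ci computes the same greedy matcher
theorem foldl_ptr_eq_greedy (cand : List (List String)) (ts : List (List String))
    (ci : Nat) (hci : ci ≤ cand.length) :
    ((ts.foldl
        (fun ci trans =>
          if ci < cand.length && sc_matches (cand.getD ci []) trans then ci + 1 else ci)
        ci) == cand.length) = greedy (cand.drop ci) ts := by
  induction ts generalizing ci with
  | nil =>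
    simp only [List.foldl_nil]
    by_cases h : ci = cand.length
    · have : cand.drop ci = [] := List.drop_eq_nil_of_le (by omega)
      simp [h, greedy]
    · have hlt : ci < cand.length := by omega
      rw [List.drop_eq_getElem_cons hlt, greedy]
      simp [h]
  | cons t ts ih =>
    simp only [List.foldl_cons]
    by_cases h : ci = cand.length
    · have hdrop : cand.drop ci = [] := List.drop_eq_nil_of_le (by omega)
      have hcond : (ci < cand.length && sc_matches (cand.getD ci []) t) = false := by
        simp [h]
      rw [hcond]
      simp only [Bool.false_eq_true, if_false]
      rw [ih ci hci, hdrop]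
      simp [greedy]
    · have hlt : ci < cand.length := by omega
      rw [List.drop_eq_getElem_cons hlt, greedy]
      have hget : cand.getD ci [] = cand[ci] := List.getD_eq_getElem cand [] hlt
      rw [hget, sc_matches_eq]
      by_cases hm : is_subset cand[ci] t = true
      · simp only [hm, if_pos, hlt, decide_true, Bool.true_and]
        exact ih (ci + 1) (by omega)
      · simp only [hm, Bool.false_eq_true, if_false, hlt, decide_true, Bool.true_and]
        rw [ih ci hci, List.drop_eq_getElem_cons hlt]

theorem occurs_eq_is_subsequence (cand seq : List (List String)) :
    sc_occurs cand seq = is_subsequence cand seq := by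
  unfold sc_occurs is_subsequence
  rw [foldl_ptr_eq_greedy cand seq 0 (by omega),
      subseqGo_eq_greedy seq cand [] 0 (by simp)]
  rfl

-- A's range/set loop fills slot k with the count for candidate k
theorem support_count_foldl_range (Ck data : List (List (List String))) (n : Nat)
    (hn : n ≤ Ck.length) (sup : List Int) (hsup : sup.length = Ck.length) :
    (List.range n).foldl
      (fun (sup : List Int) (k : Nat) =>
        PySem.List.pySetD sup (k : Int)
          (data.foldl
            (fun c d => if is_subsequence (Ck.getD ((k : Int)).toNat []) d then c + 1 else c) 0))
      sup
    = (List.range n).map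
        (fun k =>
          data.foldl (fun c d => if is_subsequence (Ck.getD k []) d then c + 1 else c) 0)
      ++ sup.drop n := by
  induction n with
  | zero => simp
  | succ n ih =>
    rw [List.range_succ, List.foldl_append, ih (by omega), List.map_append]
    simp only [List.foldl_cons, List.foldl_nil, Int.toNat_natCast,
      PySem.List.pySetD_natCast, List.map_cons, List.map_nil]
    have hlen : ((List.range n).map
        (fun k =>
          data.foldl (fun c d => if is_subsequence (Ck.getD k []) d then c + 1 else c)
            (0 : Int))).length = n := by simp
    rw [List.set_append]
    simp only [hlen, lt_irrefl, if_false, Nat.sub_self]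
    have hdrop : sup.drop n = sup[n] :: sup.drop (n + 1) :=
      List.drop_eq_getElem_cons (by omega)
    rw [hdrop, List.append_assoc]
    rfl

-- ===== VERDICT (by name: the statement is the Claim_ definition above) =====
theorem support_count_spec : Claim_equal_support_count := by
  unfold Claim_equal_support_count
  intro Ck data _
  unfold Spec_support_count support_count support_count_alt
  rw [PySem.List.pyRange_zero_natCast Ck.length, List.foldl_map,
      support_count_foldl_range Ck data Ck.length (le_refl _) _ (by simp),
      List.drop_eq_nil_of_le (by simp), List.append_nil]
  apply List.ext_getElem (by simp)
  intro i h1 h2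
  simp only [List.getElem_map, List.getElem_range]
  have hi : i < Ck.length := by simpa using h2
  have hget : Ck.getD i [] = Ck[i] := List.getD_eq_getElem Ck [] hi
  rw [hget, PySem.List.foldl_count_if, zero_add, ← List.countP_eq_length_filter]
  congr 1
  apply List.countP_congr
  intro d _
  rw [occurs_eq_is_subsequence]
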